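-- pv_equiv track=rewrite | github.com/sunnyguan/fridge-api | tesseract_image_to_text.py | summarize_food_data
-- ===== SOURCE A (Python) =====
-- from typing import List, Dict
--
-- def summarize_food_data(unprocessed_food_list: List[str]) -> List[Dict[str, str]]:
--     """Creates a list of dictionaries indicating the item name, quantity, and units.
--
--     As units are not part of the data extracted from the receipt, dashes are put in as a placeholder.
--     """
--     summary: List[Dict[str, str]] = []
--     item_count_data: Dict[str, int] = {}
--
--     for item in unprocessed_food_list:
--         if item not in item_count_data:
--             item_count_data[item] = 1
--         else:
--             item_count_data[item] += 1
--
--     for product in item_count_data: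
--         item_information: Dict[str, str] = {}
--         item_information["name"] = product
--         item_information["quantity"] = str(item_count_data[product])
--         item_information["units"] = "-"
--         summary.append(item_information)
--
--     return summary
-- ===== SOURCE B (Python) =====
-- from typing import List, Dict
--
-- def summarize_food_data(unprocessed_food_list: List[str]) -> List[Dict[str, str]]:
--     """Single pass over the list: emit one summary row per first occurrence,
--     with the quantity taken directly as the list's total count of that item."""
--     summary: List[Dict[str, str]] = []
--     seen = set()
--     for item in unprocessed_food_list:
--         if item not in seen:
--             seen.add(item)
--             summary.append({
--                 "name": item,
--                 "quantity": str(unprocessed_food_list.count(item)),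
--                 "units": "-",
--             })
--     return summary
-- ===== Notes on version B (the rewrite author's own statement) =====
-- stated objective: alternative
-- what changed: Replaced A's two-phase count-dict-then-rebuild with a single pass that emits a summary row at each first occurrence, taking the quantity from list.count; no quantity table is maintained.
import Mathlib
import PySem

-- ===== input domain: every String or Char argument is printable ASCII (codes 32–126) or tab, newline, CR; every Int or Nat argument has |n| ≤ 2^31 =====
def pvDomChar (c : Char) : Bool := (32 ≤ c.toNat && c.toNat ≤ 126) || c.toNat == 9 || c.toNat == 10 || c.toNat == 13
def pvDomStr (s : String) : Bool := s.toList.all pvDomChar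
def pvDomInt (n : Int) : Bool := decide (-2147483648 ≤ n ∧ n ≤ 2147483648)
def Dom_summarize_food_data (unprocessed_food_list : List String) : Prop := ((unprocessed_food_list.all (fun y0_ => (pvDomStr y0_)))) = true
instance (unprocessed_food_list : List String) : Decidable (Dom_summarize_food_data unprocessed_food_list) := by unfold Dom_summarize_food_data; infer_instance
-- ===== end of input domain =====

-- B does the summary in ONE pass (row per first occurrence, quantity via list.count) instead of A's count-dict plus rebuild loop; alternative decomposition, not faster.

-- ===== PORT A =====
def summarize_food_data (unprocessed_food_list : List String) : List (List (String × String)) :=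
  let item_count_data : PySem.Dict String Int :=
    unprocessed_food_list.foldl
      (fun d item =>
        if d.contains item = false then d.insert item 1
        else d.insert item (d.getD item 0 + 1))
      PySem.Dict.empty
  item_count_data.keys.foldl
    (fun summary product =>
      summary ++ [[("name", product),
                   ("quantity", PySem.Int.toStr (item_count_data.getD product 0)),
                   ("units", "-")]])
    []

-- ===== PORT B =====
def summarize_food_data_alt (unprocessed_food_list : List String) : List (List (String × String)) :=
  (unprocessed_food_list.foldl
    (fun (acc : PySem.Set String × List (List (String × String))) item =>
      if PySem.Set.contains acc.1 item then acc
      else (PySem.Set.add acc.1 item,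
            acc.2 ++ [[("name", item),
                       ("quantity", PySem.Int.toStr ((unprocessed_food_list.count item : Int))),
                       ("units", "-")]]))
    (PySem.Set.empty, [])).2

-- ===== PRECONDITION & SPEC =====
def Spec_summarize_food_data (unprocessed_food_list : List String) (out : List (List (String × String))) : Prop := out = summarize_food_data_alt unprocessed_food_list
instance (unprocessed_food_list : List String) (out : List (List (String × String))) : Decidable (Spec_summarize_food_data unprocessed_food_list out) := by unfold Spec_summarize_food_data; infer_instance

-- ===== CLAIM (what is proved, stated in full; the proofs are below) =====
def Claim_equal_summarize_food_data : Prop := ∀ (unprocessed_food_list : List String), Dom_summarize_food_data unprocessed_food_list → Spec_summarize_food_data unprocessed_food_list (summarize_food_data unprocessed_food_list)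

-- ===== LEMMAS AND PROOFS =====

-- A's counting loop is exactly the Counter fold.
theorem countLoop_eq_counter (xs : List String) :
    xs.foldl
      (fun d item =>
        if d.contains item = false then d.insert item 1
        else d.insert item (d.getD item 0 + 1))
      PySem.Dict.empty = PySem.Dict.counter xs := by
  rw [← PySem.Dict.foldl_insert_getD_add_one_eq_counter]
  congr 1
  funext d item
  by_cases h : d.contains item = false
  · rw [if_pos h, PySem.Dict.getD_of_not_contains d 0 h, zero_add]
  · rw [if_neg h]

-- B's loop invariant: the seen set is the set of the processed prefix p,
-- and the accumulated output is that set's row list.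
theorem bloop_invariant (f : String → List (String × String)) :
    ∀ (l p : List String),
      (l.foldl
        (fun (acc : PySem.Set String × List (List (String × String))) item =>
          if PySem.Set.contains acc.1 item then acc
          else (PySem.Set.add acc.1 item, acc.2 ++ [f item]))
        (PySem.Set.ofList p, (PySem.Set.ofList p).map f)).2
      = (PySem.Set.ofList (p ++ l)).map f := by
  intro l
  induction l with
  | nil => intro p; simp
  | cons x t ih =>
    intro p
    have hx := ih (p ++ [x])
    rw [List.append_cons]
    rw [← hx]
    simp only [List.foldl_cons]
    by_cases hmem : x ∈ PySem.Set.ofList p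
    · have hc : PySem.Set.contains (PySem.Set.ofList p) x = true :=
        (PySem.Set.contains_iff _ _).mpr hmem
      have hof : PySem.Set.ofList (p ++ [x]) = PySem.Set.ofList p := by
        rw [PySem.Set.ofList_append_singleton, PySem.Set.add_of_mem hmem]
      rw [hof, hc, if_pos rfl]
    · have hc : PySem.Set.contains (PySem.Set.ofList p) x = false := by
        rcases Bool.eq_false_or_eq_true (PySem.Set.contains (PySem.Set.ofList p) x) with h | h
        · exact absurd ((PySem.Set.contains_iff _ _).mp h) hmem
        · exact h
      have hof : PySem.Set.ofList (p ++ [x]) = PySem.Set.ofList p ++ [x] := by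
        rw [PySem.Set.ofList_append_singleton, PySem.Set.add_of_not_mem hmem]
      rw [hof, hc, List.map_append, List.map_cons, List.map_nil]
      rw [if_neg (by simp)]
      rw [PySem.Set.add_of_not_mem hmem]

-- ===== VERDICT (by name: the statement is the Claim_ definition above) =====
theorem summarize_food_data_spec : Claim_equal_summarize_food_data := by
  intro xs _
  unfold Spec_summarize_food_data summarize_food_data summarize_food_data_alt
  rw [countLoop_eq_counter]
  show (PySem.Dict.counter xs).keys.foldl
      (fun summary product =>
        summary ++ [[("name", product),
                     ("quantity", PySem.Int.toStr ((PySem.Dict.counter xs).getD product 0)),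
                     ("units", "-")]]) []
    = (xs.foldl
        (fun (acc : PySem.Set String × List (List (String × String))) item =>
          if PySem.Set.contains acc.1 item then acc
          else (PySem.Set.add acc.1 item,
                acc.2 ++ [[("name", item),
                           ("quantity", PySem.Int.toStr ((xs.count item : Int))),
                           ("units", "-")]]))
        (PySem.Set.ofList ([] : List String),
         (PySem.Set.ofList ([] : List String)).map
           (fun item => [("name", item),
                         ("quantity", PySem.Int.toStr ((xs.count item : Int))),
                         ("units", "-")]))).2
  rw [bloop_invariant
        (fun item => [("name", item),
                      ("quantity", PySem.Int.toStr ((xs.count item : Int))),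
                      ("units", "-")]) xs []]
  rw [PySem.List.foldl_append_singleton_eq_map, PySem.Dict.keys_counter, List.nil_append]
  apply List.map_congr_left
  intro k _
  rw [PySem.Dict.getD_counter]
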